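-- pv_equiv track=rewrite | github.com/StuartLech/CS476 | Projects/Project3/shortest_superstring.py | greedy_hamiltonian_path
-- ===== SOURCE A (Python) =====
-- def find(parent, i):
--     if parent[i] != i:
--         parent[i] = find(parent, parent[i])
--     return parent[i]
--
-- def union(parent, rank, x, y):
--     xroot = find(parent, x)
--     yroot = find(parent, y)
--     if xroot == yroot:
--         return False
--     if rank[xroot] < rank[yroot]:
--         parent[xroot] = yroot
--     else:
--         parent[yroot] = xroot
--         if rank[xroot] == rank[yroot]:
--             rank[xroot] += 1
--     return True
--
-- def greedy_hamiltonian_path(fragments, edges):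
--     n = len(fragments)
--     parent = [i for i in range(n)]
--     rank = [0] * n
--     in_degree = [0] * n
--     out_degree = [0] * n
--     selected_edges = {}
--
--     edges.sort(reverse=True)
--
--     for overlap, u, v in edges:
--         if out_degree[u] == 0 and in_degree[v] == 0:
--             if find(parent, u) != find(parent, v):
--                 union(parent, rank, u, v)
--                 out_degree[u] = 1
--                 in_degree[v] = 1
--                 selected_edges[u] = (v, overlap)
--                 if len(selected_edges) == n - 1:
--                     break
--
--     # Find the starting node (node with in_degree 0)
--     start_nodes = [i for i in range(n) if in_degree[i] == 0]
--     if len(start_nodes) != 1: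
--         raise Exception("Multiple starting nodes found, invalid Hamiltonian path")
--
--     path = []
--     current = start_nodes[0]
--     while True:
--         path.append(current)
--         if current in selected_edges:
--             current = selected_edges[current][0]
--         else:
--             break
--
--     return path, selected_edges
-- ===== SOURCE B (Python) =====
-- def greedy_hamiltonian_path(fragments, edges):
--     n = len(fragments)
--     in_degree = [0] * n
--     out_degree = [0] * n
--     selected_edges = {}
--     # chain-endpoint arrays instead of union-find:
--     # head_of_tail[t] = head of the chain whose tail is t; tail_of_head[h] = tail of chain whose head is h
--     head_of_tail = list(range(n))
--     tail_of_head = list(range(n))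
--
--     for overlap, u, v in sorted(edges, reverse=True):
--         if out_degree[u] == 0 and in_degree[v] == 0 and head_of_tail[u] != head_of_tail[tail_of_head[v]]:
--             out_degree[u] = 1
--             in_degree[v] = 1
--             selected_edges[u] = (v, overlap)
--             chain_tail = tail_of_head[v]
--             chain_head = head_of_tail[u]
--             head_of_tail[chain_tail] = chain_head
--             tail_of_head[chain_head] = chain_tail
--             if len(selected_edges) == n - 1:
--                 break
--
--     start_nodes = [i for i in range(n) if in_degree[i] == 0]
--     if len(start_nodes) != 1:
--         raise Exception("Multiple starting nodes found, invalid Hamiltonian path")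
--
--     path = []
--     current = start_nodes[0]
--     while True:
--         path.append(current)
--         if current in selected_edges:
--             current = selected_edges[current][0]
--         else:
--             break
--
--     return path, selected_edges
-- ===== Notes on version B (the rewrite author's own statement) =====
-- stated objective: simpler
-- what changed: Replaces the union-find (find with path compression, union by rank) cycle test with two chain-endpoint arrays head_of_tail/tail_of_head: an edge u->v closes a cycle exactly when the canonical head of u's chain equals the canonical head of v's chain (head_of_tail[u] == head_of_tail[tail_of_head[v]]), and accepting it splices the two chains with two array writes; start-node detection, the n-1 break and the path walk are unchanged.
import Mathlib
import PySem

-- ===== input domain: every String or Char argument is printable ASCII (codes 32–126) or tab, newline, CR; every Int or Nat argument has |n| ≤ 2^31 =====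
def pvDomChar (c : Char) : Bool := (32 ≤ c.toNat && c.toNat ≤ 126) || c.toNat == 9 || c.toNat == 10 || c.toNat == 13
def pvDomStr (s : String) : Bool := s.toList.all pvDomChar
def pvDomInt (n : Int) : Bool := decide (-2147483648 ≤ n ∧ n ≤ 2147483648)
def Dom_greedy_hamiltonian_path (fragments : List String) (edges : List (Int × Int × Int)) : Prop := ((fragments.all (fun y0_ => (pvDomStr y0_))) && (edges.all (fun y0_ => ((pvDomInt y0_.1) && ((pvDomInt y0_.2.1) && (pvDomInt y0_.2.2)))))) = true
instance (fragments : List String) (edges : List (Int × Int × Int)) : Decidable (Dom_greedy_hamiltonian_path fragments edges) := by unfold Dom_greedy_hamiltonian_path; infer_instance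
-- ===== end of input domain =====

-- B replaces A's union-find (path compression + rank) cycle test by two chain-endpoint
-- arrays (head_of_tail / tail_of_head) spliced in O(1) per accepted edge; objective:
-- simpler. Equivalence is about the RETURN value only: A sorts its `edges` argument in place,
-- B does not mutate it.


-- shared by both ports: both Pythons sort the edge list by `sorted(edges, reverse=True)`
-- (descending lexicographic on the (overlap, u, v) triple).  Ported as a stable two-pass
-- radix sort: a stable descending sort on the last component followed by a stable descending
-- sort on the first two — exact for Python's stable sort.
def pvSortDesc (edges : List (Int × Int × Int)) : List (Int × Int × Int) :=
  PySem.List.sorted2 (PySem.List.sorted edges (fun t => t.2.2) true)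
    (fun t => t.1) (fun t => t.2.1) true

-- ===== PORT A =====

-- find(parent, i) with path compression; the mutated `parent` is threaded through.
-- Python's recursion has no bound; the port takes fuel (callers pass parent.length, which
-- suffices on every state the loop reaches — proved below, not assumed).
def pvFind : Nat → List Int → Int → List Int × Int
  | 0, parent, i => (parent, i)
  | fuel+1, parent, i =>
    let pi := PySem.List.pyGetD parent i 0
    if pi ≠ i then
      let r := pvFind fuel parent pi
      (PySem.List.pySetD r.1 i r.2, r.2)
    else (parent, pi)

-- union(parent, rank, x, y): returns (parent, rank, bool)
def pvUnion (fuel : Nat) (parent rank : List Int) (x y : Int) :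
    List Int × List Int × Bool :=
  let fx := pvFind fuel parent x
  let fy := pvFind fuel fx.1 y
  if fx.2 = fy.2 then (fy.1, rank, false)
  else if PySem.List.pyGetD rank fx.2 0 < PySem.List.pyGetD rank fy.2 0 then
    (PySem.List.pySetD fy.1 fx.2 fy.2, rank, true)
  else
    (PySem.List.pySetD fy.1 fy.2 fx.2,
     if PySem.List.pyGetD rank fx.2 0 = PySem.List.pyGetD rank fy.2 0 then
       PySem.List.pySetD rank fx.2 (PySem.List.pyGetD rank fx.2 0 + 1)
     else rank,
     true)

structure PVStA where
  parent : List Int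
  rank : List Int
  indeg : List Int
  outdeg : List Int
  sel : PySem.Dict Int (Int × Int)
  done : Bool

-- one iteration of A's `for overlap, u, v in edges:` loop (done = the `break` happened)
def pvStepA (n : Int) (s : PVStA) (e : Int × Int × Int) : PVStA :=
  if s.done then s else
  if PySem.List.pyGetD s.outdeg e.2.1 0 = 0 ∧ PySem.List.pyGetD s.indeg e.2.2 0 = 0 then
    let fu := pvFind s.parent.length s.parent e.2.1
    let fv := pvFind s.parent.length fu.1 e.2.2
    if fu.2 ≠ fv.2 then
      let ur := pvUnion s.parent.length fv.1 s.rank e.2.1 e.2.2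
      let sel' := s.sel.insert e.2.1 (e.2.2, e.1)
      { parent := ur.1, rank := ur.2.1,
        indeg := PySem.List.pySetD s.indeg e.2.2 1,
        outdeg := PySem.List.pySetD s.outdeg e.2.1 1,
        sel := sel',
        done := decide ((sel'.size : Int) = n - 1) }
    else { s with parent := fv.1 }
  else s

-- the final `while True:` walk (shared verbatim by both Pythons); fuel bounds the walk,
-- n + 1 suffices on every input A returns on.
def pvWalk : Nat → PySem.Dict Int (Int × Int) → Int → List Int → List Int
  | 0, _, cur, path => path ++ [cur]
  | fuel+1, sel, cur, path =>
    match sel.get? cur with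
    | some t => pvWalk fuel sel t.1 (path ++ [cur])
    | none => path ++ [cur]

def greedy_hamiltonian_path (fragments : List String) (edges : List (Int × Int × Int)) :
    List Int × (List (Int × Int × Int)) :=
  let n : Int := PySem.List.len fragments
  let init : PVStA :=
    { parent := PySem.List.pyRange 0 n 1,
      rank := List.replicate fragments.length 0,
      indeg := List.replicate fragments.length 0,
      outdeg := List.replicate fragments.length 0,
      sel := PySem.Dict.empty, done := false }
  let s := (pvSortDesc edges).foldl (pvStepA n) init
  let start_nodes := (PySem.List.pyRange 0 n 1).filter
    (fun i => PySem.List.pyGetD s.indeg i 0 == 0)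
  if start_nodes.length = 1 then
    (pvWalk (fragments.length + 1) s.sel (PySem.List.pyGetD start_nodes 0 0) [], s.sel.items)
  else ([], [])  -- Python raises Exception here (excluded by Pre_)

-- ===== PORT B =====

structure PVStB where
  indeg : List Int
  outdeg : List Int
  hot : List Int   -- head_of_tail
  toh : List Int   -- tail_of_head
  sel : PySem.Dict Int (Int × Int)
  done : Bool

-- one iteration of B's loop: accept u→v iff the degree guard holds and the canonical head
-- of u's chain differs from the canonical head of v's chain; then splice the two chains.
def pvStepB (n : Int) (s : PVStB) (e : Int × Int × Int) : PVStB :=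
  if s.done then s else
  if PySem.List.pyGetD s.outdeg e.2.1 0 = 0 ∧ PySem.List.pyGetD s.indeg e.2.2 0 = 0 ∧
     PySem.List.pyGetD s.hot e.2.1 0 ≠
       PySem.List.pyGetD s.hot (PySem.List.pyGetD s.toh e.2.2 0) 0 then
    let sel' := s.sel.insert e.2.1 (e.2.2, e.1)
    let chainTail := PySem.List.pyGetD s.toh e.2.2 0
    let chainHead := PySem.List.pyGetD s.hot e.2.1 0
    { indeg := PySem.List.pySetD s.indeg e.2.2 1,
      outdeg := PySem.List.pySetD s.outdeg e.2.1 1,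
      hot := PySem.List.pySetD s.hot chainTail chainHead,
      toh := PySem.List.pySetD s.toh chainHead chainTail,
      sel := sel',
      done := decide ((sel'.size : Int) = n - 1) }
  else s

def greedy_hamiltonian_path_alt (fragments : List String) (edges : List (Int × Int × Int)) :
    List Int × (List (Int × Int × Int)) :=
  let n : Int := PySem.List.len fragments
  let init : PVStB :=
    { indeg := List.replicate fragments.length 0,
      outdeg := List.replicate fragments.length 0,
      hot := PySem.List.pyRange 0 n 1,
      toh := PySem.List.pyRange 0 n 1,
      sel := PySem.Dict.empty, done := false }
  let s := (pvSortDesc edges).foldl (pvStepB n) init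
  let start_nodes := (PySem.List.pyRange 0 n 1).filter
    (fun i => PySem.List.pyGetD s.indeg i 0 == 0)
  if start_nodes.length = 1 then
    (pvWalk (fragments.length + 1) s.sel (PySem.List.pyGetD start_nodes 0 0) [], s.sel.items)
  else ([], [])  -- Python raises Exception here (excluded by Pre_)

-- ===== PRECONDITION & SPEC =====

-- Whether A returns or raises is inherently run-dependent: it raises IndexError the first
-- time the loop actually indexes with an endpoint outside Python's wraparound range [-n, n)
-- (short-circuit `and` and the early break skip some endpoints), and raises its explicit
-- Exception when the greedy selection leaves more than one chain.  pvSim therefore replays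
-- only the greedy ACCEPTANCE RULE — with the same guard order, index-range checks and break —
-- using a plain partition-relabel list (no union-find, no chain-endpoint arrays; independent
-- of both ports): ok = no IndexError, k = number of accepted edges.
structure PVSimSt where
  comp : List Int
  indeg : List Int
  outdeg : List Int
  k : Nat
  ok : Bool
  done : Bool

def pvSimStep (n : Int) (s : PVSimSt) (e : Int × Int × Int) : PVSimSt :=
  if s.ok = false then s
  else if s.done then s
  else if ¬ (-n ≤ e.2.1 ∧ e.2.1 < n) then { s with ok := false }
  else if PySem.List.pyGetD s.outdeg e.2.1 0 ≠ 0 then s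
  else if ¬ (-n ≤ e.2.2 ∧ e.2.2 < n) then { s with ok := false }
  else if PySem.List.pyGetD s.indeg e.2.2 0 ≠ 0 then s
  else if PySem.List.pyGetD s.comp e.2.1 0 ≠ PySem.List.pyGetD s.comp e.2.2 0 then
    { comp := s.comp.map (fun x =>
        if x = PySem.List.pyGetD s.comp e.2.2 0 then PySem.List.pyGetD s.comp e.2.1 0 else x),
      indeg := PySem.List.pySetD s.indeg e.2.2 1,
      outdeg := PySem.List.pySetD s.outdeg e.2.1 1,
      k := s.k + 1, ok := true, done := decide (((s.k + 1 : Nat) : Int) = n - 1) }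
  else s

def pvSim (fragments : List String) (edges : List (Int × Int × Int)) : PVSimSt :=
  (pvSortDesc edges).foldl (pvSimStep (PySem.List.len fragments))
    { comp := PySem.List.pyRange 0 (PySem.List.len fragments) 1,
      indeg := List.replicate fragments.length 0,
      outdeg := List.replicate fragments.length 0,
      k := 0, ok := true, done := false }

-- Pre_ holds exactly on the inputs where the Python A returns normally: the greedy loop
-- never indexes out of range (ok) and selects n-1 edges, i.e. builds a single chain.
def Pre_greedy_hamiltonian_path (fragments : List String) (edges : List (Int × Int × Int)) : Prop :=
  (pvSim fragments edges).ok = true ∧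
  ((pvSim fragments edges).k : Int) = PySem.List.len fragments - 1
instance (fragments : List String) (edges : List (Int × Int × Int)) : Decidable (Pre_greedy_hamiltonian_path fragments edges) := by unfold Pre_greedy_hamiltonian_path; infer_instance

def pvWitness_greedy_hamiltonian_path : List String × (List (Int × Int × Int)) :=
  (["a", "b"], [(1, 0, 1)])

def Spec_greedy_hamiltonian_path (fragments : List String) (edges : List (Int × Int × Int)) (out : List Int × (List (Int × Int × Int))) : Prop := out = greedy_hamiltonian_path_alt fragments edges
instance (fragments : List String) (edges : List (Int × Int × Int)) (out : List Int × (List (Int × Int × Int))) : Decidable (Spec_greedy_hamiltonian_path fragments edges out) := by unfold Spec_greedy_hamiltonian_path; infer_instance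

-- ===== CLAIM (what is proved, stated in full; the proofs are below) =====
def Claim_equal_greedy_hamiltonian_path : Prop := ∀ (fragments : List String) (edges : List (Int × Int × Int)), Dom_greedy_hamiltonian_path fragments edges → Pre_greedy_hamiltonian_path fragments edges → Spec_greedy_hamiltonian_path fragments edges (greedy_hamiltonian_path fragments edges)

-- ===== LEMMAS AND PROOFS =====

-- `pvP N i` : i is one of the n node indices; `pvW N i` : i is in Python's wraparound range
def pvP (N : Nat) (i : Int) : Prop := 0 ≤ i ∧ i < (N : Int)
def pvW (N : Nat) (i : Int) : Prop := -(N : Int) ≤ i ∧ i < (N : Int)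
-- the canonical (nonnegative) alias of a wraparound index
def pvN (N : Nat) (i : Int) : Int := if i < 0 then i + N else i

lemma pvN_P {N : Nat} {i : Int} (h : pvW N i) : pvP N (pvN N i) := by
  unfold pvW at h
  unfold pvN pvP
  split_ifs <;> omega

-- Python's negative index aliases i + len
lemma pv_idx_wrap (n : Nat) (i : Int) (h0 : -(n : Int) ≤ i) (h1 : i < 0) :
    PySem.List.pyIdx? n i = PySem.List.pyIdx? n (i + n) := by
  unfold PySem.List.pyIdx?
  split_ifs <;> first | rfl | omega | (congr 1; omega)

lemma pv_pg_wrap (xs : List Int) (i : Int) (h0 : -(xs.length : Int) ≤ i) (h1 : i < 0) :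
    PySem.List.pyGetD xs i 0 = PySem.List.pyGetD xs (i + xs.length) 0 := by
  simp only [PySem.List.pyGetD, PySem.List.pyGet?, pv_idx_wrap xs.length i h0 h1]

lemma pv_ps_wrap (xs : List Int) (i v : Int) (h0 : -(xs.length : Int) ≤ i) (h1 : i < 0) :
    PySem.List.pySetD xs i v = PySem.List.pySetD xs (i + xs.length) v := by
  simp only [PySem.List.pySetD, PySem.List.pySet?, pv_idx_wrap xs.length i h0 h1]

lemma pv_pg_norm (xs : List Int) (N : Nat) (i : Int) (hl : xs.length = N) (h : pvW N i) :
    PySem.List.pyGetD xs i 0 = PySem.List.pyGetD xs (pvN N i) 0 := by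
  unfold pvN
  split_ifs with hneg
  · rw [pv_pg_wrap xs i (by rw [hl]; exact h.1) hneg, hl]
  · rfl

lemma pv_ps_norm (xs : List Int) (N : Nat) (i v : Int) (hl : xs.length = N) (h : pvW N i) :
    PySem.List.pySetD xs i v = PySem.List.pySetD xs (pvN N i) v := by
  unfold pvN
  split_ifs with hneg
  · rw [pv_ps_wrap xs i v (by rw [hl]; exact h.1) hneg, hl]
  · rfl

-- reading a list after an in-range write, at a nonnegative index
lemma pv_pg_set (xs : List Int) (i j v : Int) (h0 : 0 ≤ i) (h1 : i < (xs.length : Int)) (hj : 0 ≤ j) :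
    PySem.List.pyGetD (PySem.List.pySetD xs i v) j 0 =
      if j = i then v else PySem.List.pyGetD xs j 0 := by
  rw [PySem.List.pySetD_of_nonneg xs v h0]
  by_cases hjl : j < (xs.length : Int)
  · rw [PySem.List.pyGetD_eq_getElem _ 0 hj (by simpa using hjl),
        PySem.List.pyGetD_eq_getElem _ 0 hj hjl,
        List.getElem_set]
    by_cases hij : j = i
    · subst hij; simp
    · rw [if_neg (by omega), if_neg hij]
  · have hoob : ∀ (ys : List Int), ys.length = xs.length → PySem.List.pyGetD ys j 0 = 0 := by
      intro ys hlen
      apply PySem.List.pyGetD_of_none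
      rw [PySem.List.pyGet?_eq_none_iff, hlen]
      unfold PySem.Raise.InRange
      omega
    rw [hoob _ (by simp), hoob xs rfl, if_neg (by omega)]

lemma pv_pg_range (N : Nat) (i : Int) (h : pvP N i) :
    PySem.List.pyGetD (PySem.List.pyRange 0 (N : Int) 1) i 0 = i := by
  obtain ⟨hl0, hl1⟩ := h
  rw [PySem.List.pyGetD_eq_getElem _ 0 hl0
       (by rw [PySem.List.length_pyRange_one]; omega),
      PySem.List.getElem_pyRange_one]
  omega

lemma pv_pg_replicate (N : Nat) (j : Int) (hj : 0 ≤ j) :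
    PySem.List.pyGetD (List.replicate N (0 : Int)) j 0 = 0 := by
  by_cases hjl : j < (N : Int)
  · rw [PySem.List.pyGetD_eq_getElem _ 0 hj (by simpa using hjl), List.getElem_replicate]
  · apply PySem.List.pyGetD_of_none
    rw [PySem.List.pyGet?_eq_none_iff]
    unfold PySem.Raise.InRange
    simp only [List.length_replicate]
    omega

-- the union-find representation invariant: c maps each node to the representative of its
-- class, d is a strictly decreasing depth measure along parent pointers
structure PVUF (N : Nat) (parent : List Int) (c : Int → Int) (d : Int → Nat) : Prop where
  len : parent.length = N
  inr : ∀ i, pvP N i → pvP N (PySem.List.pyGetD parent i 0)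
  cpar : ∀ i, pvP N i → c (PySem.List.pyGetD parent i 0) = c i
  cP : ∀ i, pvP N i → pvP N (c i)
  croot : ∀ i, pvP N i → PySem.List.pyGetD parent (c i) 0 = c i
  rootc : ∀ i, pvP N i → PySem.List.pyGetD parent i 0 = i → c i = i
  ddec : ∀ i, pvP N i → PySem.List.pyGetD parent i 0 ≠ i →
    d (PySem.List.pyGetD parent i 0) < d i
  droot : ∀ i, pvP N i → PySem.List.pyGetD parent i 0 = i → d i = 0

lemma pvUF_cc {N : Nat} {parent : List Int} {c : Int → Int} {d : Int → Nat}
    (h : PVUF N parent c d) (i : Int) (hi : pvP N i) : c (c i) = c i :=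
  h.rootc _ (h.cP i hi) (h.croot i hi)

lemma pvUF_droot' {N : Nat} {parent : List Int} {c : Int → Int} {d : Int → Nat}
    (h : PVUF N parent c d) (i : Int) (hi : pvP N i) : d (c i) = 0 :=
  h.droot _ (h.cP i hi) (h.croot i hi)

-- path compression: pointing a non-representative node straight at its representative
lemma pvUF_point {N : Nat} {parent : List Int} {c : Int → Int} {d : Int → Nat}
    (h : PVUF N parent c d) (i : Int) (hi : pvP N i)
    (hci : c i ≠ i) : PVUF N (PySem.List.pySetD parent i (c i)) c d := by
  have hil : i < (parent.length : Int) := by rw [h.len]; exact hi.2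
  have hset : ∀ j, 0 ≤ j → PySem.List.pyGetD (PySem.List.pySetD parent i (c i)) j 0 =
      if j = i then c i else PySem.List.pyGetD parent j 0 :=
    fun j hj => pv_pg_set parent i j (c i) hi.1 hil hj
  have hpar_ne : PySem.List.pyGetD parent i 0 ≠ i := fun hr => hci (h.rootc i hi hr)
  refine ⟨by rw [PySem.List.length_pySetD, h.len], ?_, ?_, h.cP, ?_, ?_, ?_, ?_⟩
  · intro j hj; rw [hset j hj.1]
    split_ifs with hji
    · exact h.cP i hi
    · exact h.inr j hj
  · intro j hj; rw [hset j hj.1]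
    split_ifs with hji
    · subst hji; exact pvUF_cc h j hj
    · exact h.cpar j hj
  · intro j hj
    have hcji : c j ≠ i := by
      intro hcj
      exact hci (by rw [← hcj]; exact pvUF_cc h j hj)
    rw [hset (c j) (h.cP j hj).1, if_neg hcji]
    exact h.croot j hj
  · intro j hj
    rw [hset j hj.1]
    split_ifs with hji
    · intro hcij; subst hji; exact absurd hcij hci
    · exact h.rootc j hj
  · intro j hj
    rw [hset j hj.1]
    split_ifs with hji
    · intro _
      subst hji
      have h0 : d (c j) = 0 := pvUF_droot' h j hj
      have h1 : 0 < d j := Nat.lt_of_le_of_lt (Nat.zero_le _) (h.ddec j hj hpar_ne)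
      omega
    · exact h.ddec j hj
  · intro j hj
    rw [hset j hj.1]
    split_ifs with hji
    · intro hcij; subst hji; exact absurd hcij hci
    · exact h.droot j hj

lemma pvFind_spec {N : Nat} {c : Int → Int} {d : Int → Nat} :
    ∀ (fuel : Nat) (parent : List Int) (i : Int), PVUF N parent c d → pvP N i → d i < fuel →
      (pvFind fuel parent i).2 = c i ∧ PVUF N (pvFind fuel parent i).1 c d := by
  intro fuel
  induction fuel with
  | zero => intro parent i _ _ h; exact absurd h (Nat.not_lt_zero _)
  | succ f ih =>
    intro parent i hUF hi hf
    by_cases hne : PySem.List.pyGetD parent i 0 ≠ i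
    · have hpi : pvP N (PySem.List.pyGetD parent i 0) := hUF.inr i hi
      have hdlt : d (PySem.List.pyGetD parent i 0) < f :=
        Nat.lt_of_lt_of_le (hUF.ddec i hi hne) (Nat.lt_succ_iff.mp hf)
      obtain ⟨h2, hUF2⟩ := ih parent _ hUF hpi hdlt
      have hci : c i ≠ i := by
        intro hcie
        exact hne (by have hx := hUF.croot i hi; rwa [hcie] at hx)
      have hval : (pvFind (f+1) parent i) =
          (PySem.List.pySetD (pvFind f parent (PySem.List.pyGetD parent i 0)).1 i
             (pvFind f parent (PySem.List.pyGetD parent i 0)).2,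
           (pvFind f parent (PySem.List.pyGetD parent i 0)).2) := by
        simp only [pvFind, if_pos hne]
      rw [hval]
      have hcpi : c (PySem.List.pyGetD parent i 0) = c i := hUF.cpar i hi
      refine ⟨by simpa using h2.trans hcpi, ?_⟩
      simp only
      rw [h2, hcpi]
      exact pvUF_point hUF2 i hi hci
    · rw [not_ne_iff] at hne
      have hval : (pvFind (f+1) parent i) = (parent, PySem.List.pyGetD parent i 0) := by
        simp only [pvFind]
        rw [if_neg (not_not_intro hne)]
      rw [hval]
      exact ⟨by rw [hne]; exact (hUF.rootc i hi hne).symm, hUF⟩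

lemma pvFind_root : ∀ (f : Nat) (parent : List Int) (i : Int),
    PySem.List.pyGetD parent i 0 = i → pvFind f parent i = (parent, i) := by
  intro f parent i h
  cases f with
  | zero => rfl
  | succ f =>
    simp only [pvFind]
    rw [if_neg (not_not_intro h), h]

lemma pvFind_len : ∀ (f : Nat) (parent : List Int) (i : Int),
    (pvFind f parent i).1.length = parent.length := by
  intro f
  induction f with
  | zero => intro parent i; rfl
  | succ f ih =>
    intro parent i
    by_cases hne : PySem.List.pyGetD parent i 0 ≠ i
    · simp only [pvFind, if_pos hne, PySem.List.length_pySetD]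
      exact ih parent _
    · rw [not_ne_iff] at hne
      simp only [pvFind]
      rw [if_neg (not_not_intro hne)]

-- find at a negative (wrapping) index is find at its canonical alias
lemma pvFind_norm {N : Nat} {c : Int → Int} {d : Int → Nat} {parent : List Int}
    (h : PVUF N parent c d) (u : Int) (hw : pvW N u) (fuel : Nat) (hf : 0 < fuel) :
    pvFind fuel parent u = pvFind fuel parent (pvN N u) := by
  unfold pvN
  by_cases hneg : u < 0
  case neg => rw [if_neg hneg]
  rw [if_pos hneg]
  obtain ⟨f, rfl⟩ : ∃ f, fuel = f + 1 := ⟨fuel - 1, by omega⟩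
  have hwP : pvP N (u + N) := ⟨by have := hw.1; omega, by have := hw.2; omega⟩
  have hg : PySem.List.pyGetD parent u 0 = PySem.List.pyGetD parent (u + N) 0 := by
    have hx := pv_pg_wrap parent u (by rw [h.len]; exact hw.1) hneg
    rwa [h.len] at hx
  have hp0 : pvP N (PySem.List.pyGetD parent (u + N) 0) := h.inr _ hwP
  have hcond : PySem.List.pyGetD parent u 0 ≠ u := by
    rw [hg]
    have := hp0.1
    omega
  have hvalU : pvFind (f+1) parent u =
      (PySem.List.pySetD (pvFind f parent (PySem.List.pyGetD parent u 0)).1 u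
         (pvFind f parent (PySem.List.pyGetD parent u 0)).2,
       (pvFind f parent (PySem.List.pyGetD parent u 0)).2) := by
    simp only [pvFind, if_pos hcond]
  by_cases hroot : PySem.List.pyGetD parent (u + N) 0 = u + N
  · have hps : PySem.List.pySetD parent u (u + (N : Int)) = parent := by
      rw [pv_ps_wrap parent u (u + N) (by rw [h.len]; exact hw.1) hneg, h.len,
          PySem.List.pySetD_of_nonneg _ _ (by have := hwP.1; omega)]
      have hlt : (u + (N : Int)).toNat < parent.length := by
        rw [h.len]; have h1 := hwP.1; have h2 := hwP.2; omega
      have hge : parent[(u + (N : Int)).toNat] = u + N := by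
        rw [← PySem.List.pyGetD_eq_getElem parent 0 hwP.1 (by rw [h.len]; exact hwP.2)]
        exact hroot
      calc parent.set (u + (N : Int)).toNat (u + (N : Int))
          = parent.set (u + (N : Int)).toNat (parent[(u + (N : Int)).toNat]) := by rw [hge]
        _ = parent := List.set_getElem_self hlt
    rw [hvalU, hg, hroot, pvFind_root f parent (u + N) hroot,
        pvFind_root (f+1) parent (u + N) hroot, hps]
  · have hvalN : pvFind (f+1) parent (u + N) =
        (PySem.List.pySetD (pvFind f parent (PySem.List.pyGetD parent (u + N) 0)).1 (u + N)
           (pvFind f parent (PySem.List.pyGetD parent (u + N) 0)).2,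
         (pvFind f parent (PySem.List.pyGetD parent (u + N) 0)).2) := by
      simp only [pvFind, if_pos hroot]
    rw [hvalU, hvalN, hg]
    have hlen : (pvFind f parent (PySem.List.pyGetD parent (u + N) 0)).1.length = N := by
      rw [pvFind_len, h.len]
    rw [pv_ps_wrap _ u _ (by rw [hlen]; exact hw.1) hneg, hlen]

-- merging classes: a absorbs b
def pvMerge (c : Int → Int) (a b : Int) : Int → Int := fun j => if c j = b then a else c j
def pvBump (d : Int → Nat) (c : Int → Int) (b : Int) : Int → Nat :=
  fun j => if c j = b then d j + 1 else d j

-- linking two class representatives a ≠ b: parent[b] := a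
lemma pvUF_link {N : Nat} {parent : List Int} {c : Int → Int} {d : Int → Nat}
    (h : PVUF N parent c d) {a b : Int} (ha : pvP N a) (hb : pvP N b)
    (hca : c a = a) (hcb : c b = b) (hab : a ≠ b) :
    PVUF N (PySem.List.pySetD parent b a) (pvMerge c a b) (pvBump d c b) := by
  have hbl : b < (parent.length : Int) := by rw [h.len]; exact hb.2
  have hset : ∀ j, 0 ≤ j → PySem.List.pyGetD (PySem.List.pySetD parent b a) j 0 =
      if j = b then a else PySem.List.pyGetD parent j 0 :=
    fun j hj => pv_pg_set parent b j a hb.1 hbl hj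
  have hroa : PySem.List.pyGetD parent a 0 = a := by
    have hx := h.croot a ha; rwa [hca] at hx
  have hcanb : c a ≠ b := by rw [hca]; exact hab
  have hMa : pvMerge c a b a = a := by simp only [pvMerge, if_neg hcanb]; exact hca
  have hMb : pvMerge c a b b = a := by simp only [pvMerge, if_pos hcb]
  refine ⟨by rw [PySem.List.length_pySetD, h.len], ?_, ?_, ?_, ?_, ?_, ?_, ?_⟩
  · intro j hj; rw [hset j hj.1]
    split_ifs with hji
    · exact ha
    · exact h.inr j hj
  · intro j hj; rw [hset j hj.1]
    by_cases hji : j = b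
    · subst hji; rw [if_pos rfl, hMa, hMb]
    · rw [if_neg hji]
      simp only [pvMerge, h.cpar j hj]
  · intro j hj
    simp only [pvMerge]
    split_ifs with hji
    · exact ha
    · exact h.cP j hj
  · intro j hj
    by_cases hjb : c j = b
    · simp only [pvMerge, if_pos hjb]
      rw [hset a ha.1, if_neg hab, hroa]
    · simp only [pvMerge, if_neg hjb]
      rw [hset (c j) (h.cP j hj).1, if_neg hjb]
      exact h.croot j hj
  · intro j hj
    rw [hset j hj.1]
    by_cases hji : j = b
    · subst hji; rw [if_pos rfl]
      intro hajb; exact absurd hajb hab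
    · rw [if_neg hji]
      intro hr
      have hcj : c j = j := h.rootc j hj hr
      simp only [pvMerge, if_neg (hcj ▸ hji)]
      exact hcj
  · intro j hj
    rw [hset j hj.1]
    by_cases hji : j = b
    · subst hji; rw [if_pos rfl]
      intro _
      have hda : d a = 0 := h.droot a ha hroa
      simp only [pvBump, if_neg hcanb, if_pos hcb]
      omega
    · rw [if_neg hji]
      intro hne
      have hd1 := h.ddec j hj hne
      have hc1 := h.cpar j hj
      simp only [pvBump, hc1]
      split_ifs with hcjb
      · omega
      · exact hd1
  · intro j hj
    rw [hset j hj.1]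
    by_cases hji : j = b
    · subst hji; rw [if_pos rfl]
      intro hajb; exact absurd hajb hab
    · rw [if_neg hji]
      intro hr
      have hcj : c j = j := h.rootc j hj hr
      simp only [pvBump, if_neg (hcj ▸ hji)]
      exact h.droot j hj hr

-- A's union on (possibly wrapping) x y from distinct classes merges them
lemma pvUnion_spec {N : Nat} {c : Int → Int} {d : Int → Nat}
    (fuel : Nat) (parent rank : List Int) (x y : Int)
    (h : PVUF N parent c d) (hwx : pvW N x) (hwy : pvW N y)
    (hcc : c (pvN N x) ≠ c (pvN N y))
    (hfx : d (pvN N x) < fuel) (hfy : d (pvN N y) < fuel) :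
    ∃ a b : Int, ((a = c (pvN N x) ∧ b = c (pvN N y)) ∨ (a = c (pvN N y) ∧ b = c (pvN N x))) ∧
      PVUF N (pvUnion fuel parent rank x y).1 (pvMerge c a b) (pvBump d c b) := by
  have hnx : pvP N (pvN N x) := pvN_P hwx
  have hny : pvP N (pvN N y) := pvN_P hwy
  have hN1 : pvFind fuel parent x = pvFind fuel parent (pvN N x) :=
    pvFind_norm h x hwx fuel (by omega)
  obtain ⟨hx2, hU1⟩ := pvFind_spec fuel parent (pvN N x) h hnx hfx
  have hN2 : pvFind fuel (pvFind fuel parent (pvN N x)).1 y =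
      pvFind fuel (pvFind fuel parent (pvN N x)).1 (pvN N y) :=
    pvFind_norm hU1 y hwy fuel (by omega)
  obtain ⟨hy2, hU2⟩ := pvFind_spec fuel (pvFind fuel parent (pvN N x)).1 (pvN N y) hU1 hny hfy
  have hccx : c (c (pvN N x)) = c (pvN N x) := pvUF_cc h (pvN N x) hnx
  have hccy : c (c (pvN N y)) = c (pvN N y) := pvUF_cc h (pvN N y) hny
  have hPx : pvP N (c (pvN N x)) := h.cP (pvN N x) hnx
  have hPy : pvP N (c (pvN N y)) := h.cP (pvN N y) hny
  simp only [pvUnion]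
  rw [hN1, hN2, hx2, hy2, if_neg hcc]
  split_ifs with hrank
  · -- parent[c x] := c y : b = c x is absorbed
    exact ⟨c (pvN N y), c (pvN N x), Or.inr ⟨rfl, rfl⟩,
      pvUF_link hU2 hPy hPx hccy hccx (Ne.symm hcc)⟩
  all_goals
    exact ⟨c (pvN N x), c (pvN N y), Or.inl ⟨rfl, rfl⟩,
      pvUF_link hU2 hPx hPy hccx hccy hcc⟩

-- the joint loop invariant: equal degree lists / selected dict / break flag, and a ghost
-- (c, d, hd, tl) tying A's union-find classes to B's chain-endpoint arrays:
-- hd i / tl i are the head / tail of i's chain, one head and one tail per class.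
structure PVG (N : Nat) (parent indeg outdeg : List Int) (sel : PySem.Dict Int (Int × Int))
    (hot toh : List Int) (c : Int → Int) (d : Int → Nat) (hd tl : Int → Int) : Prop where
  uf : PVUF N parent c d
  ilen : indeg.length = N
  olen : outdeg.length = N
  hotlen : hot.length = N
  tohlen : toh.length = N
  dle : ∀ i, pvP N i → d i ≤ sel.size
  hdP : ∀ i, pvP N i → pvP N (hd i)
  hdc : ∀ i, pvP N i → c (hd i) = c i
  hdhead : ∀ i, pvP N i → PySem.List.pyGetD indeg (hd i) 0 = 0
  tlP : ∀ i, pvP N i → pvP N (tl i)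
  tlc : ∀ i, pvP N i → c (tl i) = c i
  tltail : ∀ i, pvP N i → PySem.List.pyGetD outdeg (tl i) 0 = 0
  uniqH : ∀ i j, pvP N i → pvP N j → c i = c j →
    PySem.List.pyGetD indeg i 0 = 0 → PySem.List.pyGetD indeg j 0 = 0 → i = j
  uniqT : ∀ i j, pvP N i → pvP N j → c i = c j →
    PySem.List.pyGetD outdeg i 0 = 0 → PySem.List.pyGetD outdeg j 0 = 0 → i = j
  hhot : ∀ i, pvP N i → PySem.List.pyGetD outdeg i 0 = 0 →
    PySem.List.pyGetD hot i 0 = hd i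
  htoh : ∀ i, pvP N i → PySem.List.pyGetD indeg i 0 = 0 →
    PySem.List.pyGetD toh i 0 = tl i
  hsize : sel.size =
    (PySem.List.pyRange 0 (N : Int) 1).countP (fun i => PySem.List.pyGetD outdeg i 0 == 1)
  hkey : ∀ i, pvW N i → PySem.List.pyGetD outdeg i 0 = 0 → sel.contains i = false

-- the THREE-way invariant: while the simulator has not detected an IndexError (ok), the
-- simulator state mirrors A's degree lists / break flag / selected count, A and B agree on
-- their common components, the ghost ties A's union-find to B's chain-endpoint arrays, and
-- the simulator's relabel list induces the same partition as the ghost c.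
def PVInv2 (N : Nat) (t : PVSimSt) (a : PVStA) (b : PVStB) : Prop :=
  t.ok = true →
    (t.indeg = a.indeg ∧ t.outdeg = a.outdeg ∧ t.done = a.done ∧ t.k = a.sel.size ∧
     t.comp.length = N ∧
     a.indeg = b.indeg ∧ a.outdeg = b.outdeg ∧ a.sel = b.sel ∧ a.done = b.done ∧
     ∃ c d hd tl, PVG N a.parent a.indeg a.outdeg a.sel b.hot b.toh c d hd tl ∧
       (∀ i j, pvP N i → pvP N j →
         (PySem.List.pyGetD t.comp i 0 = PySem.List.pyGetD t.comp j 0 ↔ c i = c j)))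

-- reading a mapped list at a canonical index
lemma pv_pg_map (xs : List Int) (f : Int → Int) (i : Int) (h0 : 0 ≤ i) (h1 : i < (xs.length : Int)) :
    PySem.List.pyGetD (xs.map f) i 0 = f (PySem.List.pyGetD xs i 0) := by
  rw [PySem.List.pyGetD_eq_getElem _ 0 h0 (by simpa using h1),
      PySem.List.pyGetD_eq_getElem _ 0 h0 h1, List.getElem_map]

-- the selected-edge count stays below N while some node still has out-degree 0
lemma pvSize_lt {N : Nat} (outdeg : List Int) (u : Int) (hu : pvP N u)
    (h0 : PySem.List.pyGetD outdeg u 0 = 0) :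
    (PySem.List.pyRange 0 (N : Int) 1).countP (fun i => PySem.List.pyGetD outdeg i 0 == 1) < N := by
  have hmem : u ∈ PySem.List.pyRange 0 (N : Int) 1 := PySem.List.mem_pyRange_one.mpr ⟨hu.1, hu.2⟩
  have hlen : (PySem.List.pyRange 0 (N : Int) 1).length = N := by
    rw [PySem.List.length_pyRange_one]; omega
  have hle := List.countP_le_length
    (p := fun i => PySem.List.pyGetD outdeg i 0 == 1) (l := PySem.List.pyRange 0 (N : Int) 1)
  have hne : (PySem.List.pyRange 0 (N : Int) 1).countP
      (fun i => PySem.List.pyGetD outdeg i 0 == 1) ≠ (PySem.List.pyRange 0 (N : Int) 1).length := by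
    intro he
    have := List.countP_eq_length.mp he u hmem
    rw [h0] at this
    simp at this
  omega

-- setting out-degree of a 0-degree node to 1 increments the count by one
lemma pvCount_succ {N : Nat} (outdeg : List Int) (u : Int) (hu : pvP N u)
    (holen : outdeg.length = N) (h0 : PySem.List.pyGetD outdeg u 0 = 0) :
    (PySem.List.pyRange 0 (N : Int) 1).countP
      (fun i => PySem.List.pyGetD (PySem.List.pySetD outdeg u 1) i 0 == 1) =
    (PySem.List.pyRange 0 (N : Int) 1).countP (fun i => PySem.List.pyGetD outdeg i 0 == 1) + 1 := by
  have hu0 : (0:Int) ≤ u := hu.1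
  have hu1 : u < (N : Int) := hu.2
  have hset : ∀ j, 0 ≤ j → PySem.List.pyGetD (PySem.List.pySetD outdeg u 1) j 0 =
      if j = u then 1 else PySem.List.pyGetD outdeg j 0 :=
    fun j hj => pv_pg_set outdeg u j 1 hu.1 (by rw [holen]; exact hu.2) hj
  have hsplit : PySem.List.pyRange 0 (N : Int) 1 =
      PySem.List.pyRange 0 u 1 ++ PySem.List.pyRange u (N : Int) 1 :=
    PySem.List.pyRange_one_append 0 u (N : Int) hu.1 (le_of_lt hu.2)
  have hcons : PySem.List.pyRange u (N : Int) 1 = u :: PySem.List.pyRange (u+1) (N : Int) 1 :=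
    PySem.List.pyRange_one_cons hu.2
  rw [hsplit, hcons, List.countP_append, List.countP_append, List.countP_cons, List.countP_cons]
  have hlow : (PySem.List.pyRange 0 u 1).countP
      (fun i => PySem.List.pyGetD (PySem.List.pySetD outdeg u 1) i 0 == 1) =
      (PySem.List.pyRange 0 u 1).countP (fun i => PySem.List.pyGetD outdeg i 0 == 1) := by
    apply List.countP_congr
    intro a ha
    have hm := PySem.List.mem_pyRange_one.mp ha
    rw [hset a hm.1, if_neg (by omega)]
  have hhigh : (PySem.List.pyRange (u+1) (N : Int) 1).countP
      (fun i => PySem.List.pyGetD (PySem.List.pySetD outdeg u 1) i 0 == 1) =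
      (PySem.List.pyRange (u+1) (N : Int) 1).countP (fun i => PySem.List.pyGetD outdeg i 0 == 1) := by
    apply List.countP_congr
    intro a ha
    have hm := PySem.List.mem_pyRange_one.mp ha
    rw [hset a (by omega), if_neg (by omega)]
  rw [hlow, hhigh]
  have hat : PySem.List.pyGetD (PySem.List.pySetD outdeg u 1) u 0 = 1 := by
    rw [hset u hu.1, if_pos rfl]
  simp only [hat, h0]
  simp
  omega

-- ONE loop iteration preserves the joint invariant
-- ONE loop iteration preserves the three-way invariant (no side conditions: the simulator
-- itself records an out-of-range access by clearing ok, which makes the claim vacuous)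
lemma pvStep2_rel {N : Nat} (t : PVSimSt) (a : PVStA) (b : PVStB) (e : Int × Int × Int)
    (h : PVInv2 N t a b) :
    PVInv2 N (pvSimStep (N : Int) t e) (pvStepA (N : Int) a e) (pvStepB (N : Int) b e) := by
  by_cases hok : t.ok = true
  case neg =>
    have hfo : t.ok = false := by simpa using hok
    have hsim : pvSimStep (N : Int) t e = t := by
      simp only [pvSimStep, if_pos hfo]
    rw [hsim]
    intro hok'
    exact absurd hok' hok
  case pos =>
  have hoknot : ¬ (t.ok = false) := by simp [hok]
  obtain ⟨hti, hto, htd, htk, hcl, hIn, hOut, hSel, hDone, c, d, hd, tl, G, hcomp⟩ := h hok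
  obtain ⟨w, u, v⟩ := e
  by_cases hdn : t.done
  · -- break already happened: everybody skips
    have hdnA : a.done = true := htd ▸ hdn
    have hdnB : b.done = true := hDone ▸ hdnA
    simp only [pvSimStep, pvStepA, pvStepB, if_neg hoknot, if_pos hdn, if_pos hdnA, if_pos hdnB]
    exact fun _ => ⟨hti, hto, htd, htk, hcl, hIn, hOut, hSel, hDone, c, d, hd, tl, G, hcomp⟩
  · have hdnA : ¬ (a.done = true) := by rw [← htd]; exact hdn
    have hdnB : ¬ (b.done = true) := by rw [← hDone]; exact hdnA
    by_cases hwu : -(N : Int) ≤ u ∧ u < (N : Int)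
    case neg =>
      -- A would raise IndexError on u: the simulator clears ok, nothing to show
      have hsim : pvSimStep (N : Int) t (w, u, v) = { t with ok := false } := by
        simp only [pvSimStep, if_neg hoknot, if_neg hdn, if_pos hwu]
      rw [hsim]
      intro hok'
      simp at hok'
    case pos =>
    by_cases hgu' : PySem.List.pyGetD a.outdeg u 0 = 0
    case neg =>
      -- out_degree[u] ≠ 0: everybody skips (v is never inspected)
      have hsim : pvSimStep (N : Int) t (w, u, v) = t := by
        simp only [pvSimStep, if_neg hoknot, if_neg hdn, if_neg (not_not_intro hwu),
          if_pos (show PySem.List.pyGetD t.outdeg u 0 ≠ 0 by rw [hto]; exact hgu')]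
      have hgA : ¬ (PySem.List.pyGetD a.outdeg u 0 = 0 ∧ PySem.List.pyGetD a.indeg v 0 = 0) :=
        fun hx => hgu' hx.1
      have hgB : ¬ (PySem.List.pyGetD b.outdeg u 0 = 0 ∧ PySem.List.pyGetD b.indeg v 0 = 0 ∧
          PySem.List.pyGetD b.hot u 0 ≠
            PySem.List.pyGetD b.hot (PySem.List.pyGetD b.toh v 0) 0) :=
        fun hx => hgu' (by rw [hOut]; exact hx.1)
      rw [hsim]
      simp only [pvStepA, pvStepB, if_neg hdnA, if_neg hdnB, if_neg hgA, if_neg hgB]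
      exact fun _ => ⟨hti, hto, htd, htk, hcl, hIn, hOut, hSel, hDone, c, d, hd, tl, G, hcomp⟩
    case pos =>
    by_cases hwv : -(N : Int) ≤ v ∧ v < (N : Int)
    case neg =>
      -- A would raise IndexError on v: the simulator clears ok, nothing to show
      have hsim : pvSimStep (N : Int) t (w, u, v) = { t with ok := false } := by
        simp only [pvSimStep, if_neg hoknot, if_neg hdn, if_neg (not_not_intro hwu),
          if_neg (show ¬ (PySem.List.pyGetD t.outdeg u 0 ≠ 0) from
            not_not_intro (by rw [hto]; exact hgu')), if_pos hwv]
      rw [hsim]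
      intro hok'
      simp at hok'
    case pos =>
    by_cases hgv' : PySem.List.pyGetD a.indeg v 0 = 0
    case neg =>
      -- in_degree[v] ≠ 0: everybody skips
      have hsim : pvSimStep (N : Int) t (w, u, v) = t := by
        simp only [pvSimStep, if_neg hoknot, if_neg hdn, if_neg (not_not_intro hwu),
          if_neg (show ¬ (PySem.List.pyGetD t.outdeg u 0 ≠ 0) from
            not_not_intro (by rw [hto]; exact hgu')), if_neg (not_not_intro hwv),
          if_pos (show PySem.List.pyGetD t.indeg v 0 ≠ 0 by rw [hti]; exact hgv')]
      have hgA : ¬ (PySem.List.pyGetD a.outdeg u 0 = 0 ∧ PySem.List.pyGetD a.indeg v 0 = 0) :=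
        fun hx => hgv' hx.2
      have hgB : ¬ (PySem.List.pyGetD b.outdeg u 0 = 0 ∧ PySem.List.pyGetD b.indeg v 0 = 0 ∧
          PySem.List.pyGetD b.hot u 0 ≠
            PySem.List.pyGetD b.hot (PySem.List.pyGetD b.toh v 0) 0) :=
        fun hx => hgv' (by rw [hIn]; exact hx.2.1)
      rw [hsim]
      simp only [pvStepA, pvStepB, if_neg hdnA, if_neg hdnB, if_neg hgA, if_neg hgB]
      exact fun _ => ⟨hti, hto, htd, htk, hcl, hIn, hOut, hSel, hDone, c, d, hd, tl, G, hcomp⟩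
    case pos =>
      -- degree guard passes and both endpoints are in the wraparound range
      have hu : pvW N u := ⟨hwu.1, hwu.2⟩
      have hv : pvW N v := ⟨hwv.1, hwv.2⟩
      have hnuP : pvP N (pvN N u) := pvN_P hu
      have hnvP : pvP N (pvN N v) := pvN_P hv
      have hgu : PySem.List.pyGetD a.outdeg (pvN N u) 0 = 0 := by
        rw [← pv_pg_norm a.outdeg N u G.olen hu]; exact hgu'
      have hgv : PySem.List.pyGetD a.indeg (pvN N v) 0 = 0 := by
        rw [← pv_pg_norm a.indeg N v G.ilen hv]; exact hgv'
      have hdu : d (pvN N u) < a.parent.length := by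
        rw [G.uf.len]
        exact Nat.lt_of_le_of_lt ((G.dle _ hnuP).trans (le_of_eq G.hsize))
          (pvSize_lt a.outdeg (pvN N u) hnuP hgu)
      have hdv : d (pvN N v) < a.parent.length := by
        rw [G.uf.len]
        exact Nat.lt_of_le_of_lt ((G.dle _ hnvP).trans (le_of_eq G.hsize))
          (pvSize_lt a.outdeg (pvN N u) hnuP hgu)
      have hN1 : pvFind a.parent.length a.parent u =
          pvFind a.parent.length a.parent (pvN N u) :=
        pvFind_norm G.uf u hu a.parent.length (by omega)
      obtain ⟨hF1, hU1⟩ := pvFind_spec a.parent.length a.parent (pvN N u) G.uf hnuP hdu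
      have hN2 : pvFind a.parent.length (pvFind a.parent.length a.parent (pvN N u)).1 v =
          pvFind a.parent.length (pvFind a.parent.length a.parent (pvN N u)).1 (pvN N v) :=
        pvFind_norm hU1 v hv a.parent.length (by omega)
      obtain ⟨hF2, hU2⟩ :=
        pvFind_spec a.parent.length (pvFind a.parent.length a.parent (pvN N u)).1 (pvN N v)
          hU1 hnvP hdv
      have hbT : PySem.List.pyGetD b.toh v 0 = tl (pvN N v) := by
        rw [pv_pg_norm b.toh N v G.tohlen hv]; exact G.htoh _ hnvP hgv
      have hbH : PySem.List.pyGetD b.hot u 0 = hd (pvN N u) := by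
        rw [pv_pg_norm b.hot N u G.hotlen hu]; exact G.hhot _ hnuP hgu
      have hbHT : PySem.List.pyGetD b.hot (PySem.List.pyGetD b.toh v 0) 0 = hd (pvN N v) := by
        rw [hbT, G.hhot (tl (pvN N v)) (G.tlP _ hnvP) (G.tltail _ hnvP)]
        exact G.uniqH (hd (tl (pvN N v))) (hd (pvN N v)) (G.hdP _ (G.tlP _ hnvP)) (G.hdP _ hnvP)
          (by rw [G.hdc _ (G.tlP _ hnvP), G.tlc _ hnvP, G.hdc _ hnvP])
          (G.hdhead _ (G.tlP _ hnvP)) (G.hdhead _ hnvP)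
      have hdIff : hd (pvN N u) = hd (pvN N v) ↔ c (pvN N u) = c (pvN N v) := by
        constructor
        · intro he
          rw [← G.hdc _ hnuP, he, G.hdc _ hnvP]
        · intro hcc
          exact G.uniqH (hd (pvN N u)) (hd (pvN N v)) (G.hdP _ hnuP) (G.hdP _ hnvP)
            (by rw [G.hdc _ hnuP, G.hdc _ hnvP, hcc]) (G.hdhead _ hnuP) (G.hdhead _ hnvP)
      have hcIff : (PySem.List.pyGetD t.comp u 0 = PySem.List.pyGetD t.comp v 0) ↔
          c (pvN N u) = c (pvN N v) := by
        rw [pv_pg_norm t.comp N u hcl hu, pv_pg_norm t.comp N v hcl hv]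
        exact hcomp _ _ hnuP hnvP
      by_cases hcc : c (pvN N u) = c (pvN N v)
      · -- same chain: the simulator skips, A only compresses, B rejects
        have hsim : pvSimStep (N : Int) t (w, u, v) = t := by
          simp only [pvSimStep, if_neg hoknot, if_neg hdn, if_neg (not_not_intro hwu),
            if_neg (show ¬ (PySem.List.pyGetD t.outdeg u 0 ≠ 0) from
              not_not_intro (by rw [hto]; exact hgu')), if_neg (not_not_intro hwv),
            if_neg (show ¬ (PySem.List.pyGetD t.indeg v 0 ≠ 0) from
              not_not_intro (by rw [hti]; exact hgv')),
            if_neg (not_not_intro (hcIff.mpr hcc))]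
        have hgb : ¬ (PySem.List.pyGetD b.outdeg u 0 = 0 ∧ PySem.List.pyGetD b.indeg v 0 = 0 ∧
            PySem.List.pyGetD b.hot u 0 ≠
              PySem.List.pyGetD b.hot (PySem.List.pyGetD b.toh v 0) 0) := by
          intro hx
          exact hx.2.2 (by rw [hbH, hbHT]; exact hdIff.mpr hcc)
        rw [hsim]
        simp only [pvStepA, pvStepB, if_neg hdnA, if_neg hdnB, if_pos (And.intro hgu' hgv'),
          if_neg hgb]
        rw [hN1, hN2, hF1, hF2, if_neg (not_not_intro hcc)]
        exact fun _ => ⟨hti, hto, htd, htk, hcl, hIn, hOut, hSel, hDone, c, d, hd, tl,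
          ⟨hU2, G.ilen, G.olen, G.hotlen, G.tohlen, G.dle, G.hdP, G.hdc, G.hdhead, G.tlP,
           G.tlc, G.tltail, G.uniqH, G.uniqT, G.hhot, G.htoh, G.hsize, G.hkey⟩, hcomp⟩
      · -- different chains: everybody accepts
        have hsim : pvSimStep (N : Int) t (w, u, v) =
            { comp := t.comp.map (fun x =>
                if x = PySem.List.pyGetD t.comp v 0 then PySem.List.pyGetD t.comp u 0 else x),
              indeg := PySem.List.pySetD t.indeg v 1,
              outdeg := PySem.List.pySetD t.outdeg u 1,
              k := t.k + 1, ok := true,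
              done := decide (((t.k + 1 : Nat) : Int) = (N : Int) - 1) } := by
          simp only [pvSimStep, if_neg hoknot, if_neg hdn, if_neg (not_not_intro hwu),
            if_neg (show ¬ (PySem.List.pyGetD t.outdeg u 0 ≠ 0) from
              not_not_intro (by rw [hto]; exact hgu')), if_neg (not_not_intro hwv),
            if_neg (show ¬ (PySem.List.pyGetD t.indeg v 0 ≠ 0) from
              not_not_intro (by rw [hti]; exact hgv')),
            if_pos (show PySem.List.pyGetD t.comp u 0 ≠ PySem.List.pyGetD t.comp v 0 from
              fun he => hcc (hcIff.mp he))]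
        have hgb : PySem.List.pyGetD b.outdeg u 0 = 0 ∧ PySem.List.pyGetD b.indeg v 0 = 0 ∧
            PySem.List.pyGetD b.hot u 0 ≠
              PySem.List.pyGetD b.hot (PySem.List.pyGetD b.toh v 0) 0 := by
          refine ⟨by rw [← hOut]; exact hgu', by rw [← hIn]; exact hgv', ?_⟩
          rw [hbH, hbHT]
          exact fun he => hcc (hdIff.mp he)
        obtain ⟨A0, B0, hab, hUF'⟩ :=
          pvUnion_spec a.parent.length
            (pvFind a.parent.length (pvFind a.parent.length a.parent (pvN N u)).1 (pvN N v)).1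
            a.rank u v hU2 hu hv hcc hdu hdv
        rw [hsim]
        simp only [pvStepA, pvStepB, if_neg hdnA, if_neg hdnB, if_pos (And.intro hgu' hgv'),
          if_pos hgb]
        rw [hN1, hN2, hF1, hF2, if_pos hcc]
        -- canonical chain endpoints being spliced
        have htlvP : pvP N (tl (pvN N v)) := G.tlP _ hnvP
        have hhduP : pvP N (hd (pvN N u)) := G.hdP _ hnuP
        have htlvc : c (tl (pvN N v)) = c (pvN N v) := G.tlc _ hnvP
        have hhduc : c (hd (pvN N u)) = c (pvN N u) := G.hdc _ hnuP
        have htlvu : tl (pvN N v) ≠ pvN N u := by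
          intro he
          exact hcc (by rw [← he]; exact htlvc)
        have hdvne : hd (pvN N u) ≠ pvN N v := by
          intro he
          exact hcc (by rw [← hhduc, he])
        -- merged-class membership under the new c
        have hA0mem : A0 = c (pvN N u) ∨ A0 = c (pvN N v) := by
          rcases hab with ⟨h1, _⟩ | ⟨h1, _⟩ <;> tauto
        have hB0mem : B0 = c (pvN N u) ∨ B0 = c (pvN N v) := by
          rcases hab with ⟨_, h1⟩ | ⟨_, h1⟩ <;> tauto
        have hcm : ∀ j : Int, (c j = c (pvN N u) ∨ c j = c (pvN N v)) → pvMerge c A0 B0 j = A0 := by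
          intro j hj
          rcases hab with ⟨h1, h2⟩ | ⟨h1, h2⟩ <;> subst h1 <;> subst h2 <;>
            simp only [pvMerge] <;> rcases hj with hj | hj <;> rw [hj] <;>
            simp [hcc, Ne.symm hcc]
        have hcn : ∀ j : Int, ¬ (c j = c (pvN N u) ∨ c j = c (pvN N v)) →
            pvMerge c A0 B0 j = c j := by
          intro j hj
          simp only [pvMerge]
          rw [if_neg (by rcases hB0mem with hb | hb <;> rw [hb] <;> tauto)]
        have hA0notother : ∀ j : Int, ¬ (c j = c (pvN N u) ∨ c j = c (pvN N v)) → c j ≠ A0 := by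
          intro j hj
          rcases hA0mem with ha | ha <;> rw [ha] <;> tauto
        -- the updated lists, read at canonical indices
        have hsetIn : ∀ j, 0 ≤ j → PySem.List.pyGetD (PySem.List.pySetD a.indeg v 1) j 0 =
            if j = pvN N v then 1 else PySem.List.pyGetD a.indeg j 0 := by
          intro j hj
          rw [pv_ps_norm a.indeg N v 1 G.ilen hv]
          exact pv_pg_set a.indeg (pvN N v) j 1 hnvP.1 (by rw [G.ilen]; exact hnvP.2) hj
        have hsetOut : ∀ j, 0 ≤ j → PySem.List.pyGetD (PySem.List.pySetD a.outdeg u 1) j 0 =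
            if j = pvN N u then 1 else PySem.List.pyGetD a.outdeg j 0 := by
          intro j hj
          rw [pv_ps_norm a.outdeg N u 1 G.olen hu]
          exact pv_pg_set a.outdeg (pvN N u) j 1 hnuP.1 (by rw [G.olen]; exact hnuP.2) hj
        have hsetHot : ∀ j, 0 ≤ j →
            PySem.List.pyGetD (PySem.List.pySetD b.hot (PySem.List.pyGetD b.toh v 0)
              (PySem.List.pyGetD b.hot u 0)) j 0 =
            if j = tl (pvN N v) then hd (pvN N u) else PySem.List.pyGetD b.hot j 0 := by
          intro j hj
          rw [hbT, hbH]
          exact pv_pg_set b.hot (tl (pvN N v)) j (hd (pvN N u)) htlvP.1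
            (by rw [G.hotlen]; exact htlvP.2) hj
        have hsetToh : ∀ j, 0 ≤ j →
            PySem.List.pyGetD (PySem.List.pySetD b.toh (PySem.List.pyGetD b.hot u 0)
              (PySem.List.pyGetD b.toh v 0)) j 0 =
            if j = hd (pvN N u) then tl (pvN N v) else PySem.List.pyGetD b.toh j 0 := by
          intro j hj
          rw [hbT, hbH]
          exact pv_pg_set b.toh (hd (pvN N u)) j (tl (pvN N v)) hhduP.1
            (by rw [G.tohlen]; exact hhduP.2) hj
        have hnokey : a.sel.contains u = false := G.hkey u hu hgu'
        have hsize' : (a.sel.insert u (v, w)).size = a.sel.size + 1 := by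
          rw [PySem.Dict.size_insert, if_neg (by rw [hnokey]; exact Bool.false_ne_true)]
        have hk1 : t.k + 1 = (a.sel.insert u (v, w)).size := by rw [hsize', htk]
        intro _
        dsimp only
        refine ⟨by rw [hti], by rw [hto], by rw [hk1], hk1, by simp [hcl],
          by rw [hIn], by rw [hOut], by rw [hSel], by rw [hSel], pvMerge c A0 B0,
          pvBump d c B0,
          (fun j => if c j = c (pvN N u) ∨ c j = c (pvN N v) then hd (pvN N u) else hd j),
          (fun j => if c j = c (pvN N u) ∨ c j = c (pvN N v) then tl (pvN N v) else tl j),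
          ?_, ?_⟩
        refine ⟨hUF', ?_, ?_, ?_, ?_, ?_, ?_, ?_, ?_, ?_, ?_, ?_, ?_, ?_, ?_, ?_, ?_, ?_⟩
        · rw [PySem.List.length_pySetD]; exact G.ilen
        · rw [PySem.List.length_pySetD]; exact G.olen
        · rw [PySem.List.length_pySetD]; exact G.hotlen
        · rw [PySem.List.length_pySetD]; exact G.tohlen
        · intro i hi
          rw [hsize']
          have h1 := G.dle i hi
          simp only [pvBump]
          split_ifs <;> omega
        · intro i hi
          split_ifs with hm
          · exact hhduP
          · exact G.hdP i hi
        · intro i hi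
          by_cases hm : c i = c (pvN N u) ∨ c i = c (pvN N v)
          · rw [if_pos hm, hcm i hm, hcm (hd (pvN N u)) (Or.inl hhduc)]
          · rw [if_neg hm, hcn i hm, hcn (hd i) (by rw [G.hdc i hi]; exact hm), G.hdc i hi]
        · intro i hi
          split_ifs with hm
          · rw [hsetIn (hd (pvN N u)) hhduP.1, if_neg hdvne]
            exact G.hdhead _ hnuP
          · have hne : hd i ≠ pvN N v := by
              intro he
              exact hm (Or.inr (by rw [← G.hdc i hi, he]))
            rw [hsetIn (hd i) (G.hdP i hi).1, if_neg hne]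
            exact G.hdhead i hi
        · intro i hi
          split_ifs with hm
          · exact htlvP
          · exact G.tlP i hi
        · intro i hi
          by_cases hm : c i = c (pvN N u) ∨ c i = c (pvN N v)
          · rw [if_pos hm, hcm i hm, hcm (tl (pvN N v)) (Or.inr htlvc)]
          · rw [if_neg hm, hcn i hm, hcn (tl i) (by rw [G.tlc i hi]; exact hm), G.tlc i hi]
        · intro i hi
          split_ifs with hm
          · rw [hsetOut (tl (pvN N v)) htlvP.1, if_neg htlvu]
            exact G.tltail _ hnvP
          · have hne : tl i ≠ pvN N u := by
              intro he
              exact hm (Or.inl (by rw [← G.tlc i hi, he]))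
            rw [hsetOut (tl i) (G.tlP i hi).1, if_neg hne]
            exact G.tltail i hi
        · -- head uniqueness in the merged partition
          intro i j hi hj hcij hdi hdj
          rw [hsetIn i hi.1] at hdi
          rw [hsetIn j hj.1] at hdj
          by_cases hiv : i = pvN N v
          · rw [if_pos hiv] at hdi; exact absurd hdi one_ne_zero
          · rw [if_neg hiv] at hdi
            by_cases hjv : j = pvN N v
            · rw [if_pos hjv] at hdj; exact absurd hdj one_ne_zero
            · rw [if_neg hjv] at hdj
              by_cases hmi : c i = c (pvN N u) ∨ c i = c (pvN N v)
              · by_cases hmj : c j = c (pvN N u) ∨ c j = c (pvN N v)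
                · have hciu : c i = c (pvN N u) := by
                    rcases hmi with hx | hx
                    · exact hx
                    · exact absurd (G.uniqH i (pvN N v) hi hnvP hx hdi hgv) hiv
                  have hcju : c j = c (pvN N u) := by
                    rcases hmj with hx | hx
                    · exact hx
                    · exact absurd (G.uniqH j (pvN N v) hj hnvP hx hdj hgv) hjv
                  exact G.uniqH i j hi hj (hciu.trans hcju.symm) hdi hdj
                · rw [hcm i hmi, hcn j hmj] at hcij
                  exact absurd hcij.symm (hA0notother j hmj)
              · by_cases hmj : c j = c (pvN N u) ∨ c j = c (pvN N v)
                · rw [hcn i hmi, hcm j hmj] at hcij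
                  exact absurd hcij (hA0notother i hmi)
                · rw [hcn i hmi, hcn j hmj] at hcij
                  exact G.uniqH i j hi hj hcij hdi hdj
        · -- tail uniqueness in the merged partition
          intro i j hi hj hcij hdi hdj
          rw [hsetOut i hi.1] at hdi
          rw [hsetOut j hj.1] at hdj
          by_cases hiu : i = pvN N u
          · rw [if_pos hiu] at hdi; exact absurd hdi one_ne_zero
          · rw [if_neg hiu] at hdi
            by_cases hju : j = pvN N u
            · rw [if_pos hju] at hdj; exact absurd hdj one_ne_zero
            · rw [if_neg hju] at hdj
              by_cases hmi : c i = c (pvN N u) ∨ c i = c (pvN N v)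
              · by_cases hmj : c j = c (pvN N u) ∨ c j = c (pvN N v)
                · have hciv : c i = c (pvN N v) := by
                    rcases hmi with hx | hx
                    · exact absurd (G.uniqT i (pvN N u) hi hnuP hx hdi hgu) hiu
                    · exact hx
                  have hcjv : c j = c (pvN N v) := by
                    rcases hmj with hx | hx
                    · exact absurd (G.uniqT j (pvN N u) hj hnuP hx hdj hgu) hju
                    · exact hx
                  exact G.uniqT i j hi hj (hciv.trans hcjv.symm) hdi hdj
                · rw [hcm i hmi, hcn j hmj] at hcij
                  exact absurd hcij.symm (hA0notother j hmj)
              · by_cases hmj : c j = c (pvN N u) ∨ c j = c (pvN N v)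
                · rw [hcn i hmi, hcm j hmj] at hcij
                  exact absurd hcij (hA0notother i hmi)
                · rw [hcn i hmi, hcn j hmj] at hcij
                  exact G.uniqT i j hi hj hcij hdi hdj
        · -- head_of_tail stays correct
          intro i hi hdi
          rw [hsetOut i hi.1] at hdi
          by_cases hiu : i = pvN N u
          · rw [if_pos hiu] at hdi; exact absurd hdi one_ne_zero
          · rw [if_neg hiu] at hdi
            rw [hsetHot i hi.1]
            by_cases hit : i = tl (pvN N v)
            · rw [if_pos hit, if_pos (by rw [hit, htlvc]; exact Or.inr rfl)]
            · rw [if_neg hit, G.hhot i hi hdi]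
              by_cases hm : c i = c (pvN N u) ∨ c i = c (pvN N v)
              · rcases hm with hx | hx
                · rw [if_pos (Or.inl hx)]
                  exact G.uniqH (hd i) (hd (pvN N u)) (G.hdP i hi) hhduP
                    (by rw [G.hdc i hi, hhduc, hx]) (G.hdhead i hi) (G.hdhead _ hnuP)
                · exact absurd (G.uniqT i (tl (pvN N v)) hi htlvP (by rw [htlvc]; exact hx)
                    hdi (G.tltail _ hnvP)) hit
              · rw [if_neg hm]
        · -- tail_of_head stays correct
          intro i hi hdi
          rw [hsetIn i hi.1] at hdi
          by_cases hiv : i = pvN N v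
          · rw [if_pos hiv] at hdi; exact absurd hdi one_ne_zero
          · rw [if_neg hiv] at hdi
            rw [hsetToh i hi.1]
            by_cases hih : i = hd (pvN N u)
            · rw [if_pos hih, if_pos (by rw [hih, hhduc]; exact Or.inl rfl)]
            · rw [if_neg hih, G.htoh i hi hdi]
              by_cases hm : c i = c (pvN N u) ∨ c i = c (pvN N v)
              · rcases hm with hx | hx
                · exact absurd (G.uniqH i (hd (pvN N u)) hi hhduP (by rw [hhduc]; exact hx)
                    hdi (G.hdhead _ hnuP)) hih
                · rw [if_pos (Or.inr hx)]
                  exact G.uniqT (tl i) (tl (pvN N v)) (G.tlP i hi) htlvP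
                    (by rw [G.tlc i hi, htlvc, hx]) (G.tltail i hi) (G.tltail _ hnvP)
              · rw [if_neg hm]
        · rw [hsize', G.hsize, pv_ps_norm a.outdeg N u 1 G.olen hu,
              pvCount_succ a.outdeg (pvN N u) hnuP G.olen hgu]
        · intro i hi hdi
          have hnl : (PySem.List.pySetD a.outdeg u 1).length = N := by
            rw [PySem.List.length_pySetD]; exact G.olen
          rw [pv_pg_norm _ N i hnl hi, hsetOut (pvN N i) (pvN_P hi).1] at hdi
          by_cases hiu : pvN N i = pvN N u
          · rw [if_pos hiu] at hdi; exact absurd hdi one_ne_zero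
          · rw [if_neg hiu] at hdi
            have hiu' : i ≠ u := fun he => hiu (he ▸ rfl)
            rw [PySem.Dict.contains_insert]
            have hbe : (i == u) = false := by simpa using hiu'
            rw [hbe, Bool.false_or]
            apply G.hkey i hi
            rw [pv_pg_norm a.outdeg N i G.olen hi]
            exact hdi
        · -- the simulator relabel induces the merged partition
          intro i j hi hj
          have hcu' : PySem.List.pyGetD t.comp u 0 = PySem.List.pyGetD t.comp (pvN N u) 0 :=
            pv_pg_norm t.comp N u hcl ⟨hwu.1, hwu.2⟩
          have hcv' : PySem.List.pyGetD t.comp v 0 = PySem.List.pyGetD t.comp (pvN N v) 0 :=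
            pv_pg_norm t.comp N v hcl ⟨hwv.1, hwv.2⟩
          have hcueq : ∀ x, pvP N x →
              (PySem.List.pyGetD t.comp x 0 = PySem.List.pyGetD t.comp u 0 ↔
                c x = c (pvN N u)) := by
            intro x hx
            rw [hcu']
            exact hcomp x (pvN N u) hx hnuP
          have hcveq : ∀ x, pvP N x →
              (PySem.List.pyGetD t.comp x 0 = PySem.List.pyGetD t.comp v 0 ↔
                c x = c (pvN N v)) := by
            intro x hx
            rw [hcv']
            exact hcomp x (pvN N v) hx hnvP
          have hvm : ∀ x, pvP N x → (c x = c (pvN N u) ∨ c x = c (pvN N v)) →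
              (if PySem.List.pyGetD t.comp x 0 = PySem.List.pyGetD t.comp v 0 then
                PySem.List.pyGetD t.comp u 0 else PySem.List.pyGetD t.comp x 0) =
              PySem.List.pyGetD t.comp u 0 := by
            intro x hx hm
            rcases hm with hm | hm
            · rw [if_neg (fun he => hcc (hm ▸ (hcveq x hx).mp he))]
              exact (hcueq x hx).mpr hm
            · rw [if_pos ((hcveq x hx).mpr hm)]
          have hvn : ∀ x, pvP N x → ¬ (c x = c (pvN N u) ∨ c x = c (pvN N v)) →
              (if PySem.List.pyGetD t.comp x 0 = PySem.List.pyGetD t.comp v 0 then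
                PySem.List.pyGetD t.comp u 0 else PySem.List.pyGetD t.comp x 0) =
              PySem.List.pyGetD t.comp x 0 ∧
              PySem.List.pyGetD t.comp x 0 ≠ PySem.List.pyGetD t.comp u 0 := by
            intro x hx hm
            exact ⟨by rw [if_neg (fun he => hm (Or.inr ((hcveq x hx).mp he)))],
              fun he => hm (Or.inl ((hcueq x hx).mp he))⟩
          rw [pv_pg_map t.comp _ i hi.1 (by rw [hcl]; exact hi.2),
              pv_pg_map t.comp _ j hj.1 (by rw [hcl]; exact hj.2)]
          by_cases hmi : c i = c (pvN N u) ∨ c i = c (pvN N v)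
          · by_cases hmj : c j = c (pvN N u) ∨ c j = c (pvN N v)
            · rw [hvm i hi hmi, hvm j hj hmj]
              exact ⟨fun _ => by rw [hcm i hmi, hcm j hmj], fun _ => rfl⟩
            · rw [hvm i hi hmi, (hvn j hj hmj).1]
              constructor
              · intro hEq
                exact absurd hEq.symm (hvn j hj hmj).2
              · intro hc'
                rw [hcm i hmi, hcn j hmj] at hc'
                exact absurd hc'.symm (hA0notother j hmj)
          · by_cases hmj : c j = c (pvN N u) ∨ c j = c (pvN N v)
            · rw [(hvn i hi hmi).1, hvm j hj hmj]
              constructor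
              · intro hEq
                exact absurd hEq (hvn i hi hmi).2
              · intro hc'
                rw [hcn i hmi, hcm j hmj] at hc'
                exact absurd hc' (hA0notother i hmi)
            · rw [(hvn i hi hmi).1, (hvn j hj hmj).1]
              constructor
              · intro hEq
                rw [hcn i hmi, hcn j hmj]
                exact (hcomp i j hi hj).mp hEq
              · intro hc'
                rw [hcn i hmi, hcn j hmj] at hc'
                exact (hcomp i j hi hj).mpr hc'

lemma pvFold2_rel {N : Nat} :
    ∀ (es : List (Int × Int × Int)) (t : PVSimSt) (a : PVStA) (b : PVStB),
      PVInv2 N t a b →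
      PVInv2 N (es.foldl (pvSimStep (N : Int)) t)
        (es.foldl (pvStepA (N : Int)) a) (es.foldl (pvStepB (N : Int)) b) := by
  intro es
  induction es with
  | nil => intro t a b h; exact h
  | cons e r ih =>
    intro t a b h
    simp only [List.foldl_cons]
    exact ih _ _ _ (pvStep2_rel t a b e h)

lemma pvInit2_rel (N : Nat) : PVInv2 N
    { comp := PySem.List.pyRange 0 (N : Int) 1, indeg := List.replicate N 0,
      outdeg := List.replicate N 0, k := 0, ok := true, done := false }
    { parent := PySem.List.pyRange 0 (N : Int) 1, rank := List.replicate N 0,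
      indeg := List.replicate N 0, outdeg := List.replicate N 0,
      sel := PySem.Dict.empty, done := false }
    { indeg := List.replicate N 0, outdeg := List.replicate N 0,
      hot := PySem.List.pyRange 0 (N : Int) 1, toh := PySem.List.pyRange 0 (N : Int) 1,
      sel := PySem.Dict.empty, done := false } := by
  intro _
  have hrlen : (PySem.List.pyRange 0 (N : Int) 1).length = N := by
    rw [PySem.List.length_pyRange_one]; omega
  refine ⟨rfl, rfl, rfl, rfl, hrlen, rfl, rfl, rfl, rfl,
    (fun i => i), (fun _ => 0), (fun i => i), (fun i => i),
    ⟨⟨hrlen, ?_, ?_, ?_, ?_, ?_, ?_, ?_⟩, by simp, by simp, hrlen, hrlen,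
     ?_, ?_, ?_, ?_, ?_, ?_, ?_, ?_, ?_, ?_, ?_, ?_, ?_⟩, ?_⟩
  · intro i hi; rw [pv_pg_range N i hi]; exact hi
  · intro i hi; rw [pv_pg_range N i hi]
  · intro i hi; exact hi
  · intro i hi; exact pv_pg_range N i hi
  · intro i _ _; rfl
  · intro i hi hne; exact absurd (pv_pg_range N i hi) hne
  · intro i _ _; rfl
  · intro i _; exact Nat.zero_le _
  · intro i hi; exact hi
  · intro i _; rfl
  · intro i hi; exact pv_pg_replicate N i hi.1
  · intro i hi; exact hi
  · intro i _; rfl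
  · intro i hi; exact pv_pg_replicate N i hi.1
  · intro i j _ _ hij _ _; exact hij
  · intro i j _ _ hij _ _; exact hij
  · intro i hi _; exact pv_pg_range N i hi
  · intro i hi _; exact pv_pg_range N i hi
  · rw [PySem.Dict.size_empty]
    symm
    rw [List.countP_eq_zero]
    intro x hx
    have hm := PySem.List.mem_pyRange_one.mp hx
    rw [pv_pg_replicate N x hm.1]
    simp
  · intro i _ _; exact PySem.Dict.contains_empty i
  · intro i j hi hj
    rw [pv_pg_range N i hi, pv_pg_range N j hj]

-- ===== VERDICT (by name: the statement is the Claim_ definition above) =====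
theorem greedy_hamiltonian_path_spec : Claim_equal_greedy_hamiltonian_path := by
  intro fragments edges _ hPre
  unfold Spec_greedy_hamiltonian_path
  have hlen : PySem.List.len fragments = (fragments.length : Int) := PySem.List.len_eq fragments
  have hsim_eq : pvSim fragments edges =
      (pvSortDesc edges).foldl (pvSimStep ((fragments.length : Nat) : Int))
        { comp := PySem.List.pyRange 0 ((fragments.length : Nat) : Int) 1,
          indeg := List.replicate fragments.length 0,
          outdeg := List.replicate fragments.length 0,
          k := 0, ok := true, done := false } := by
    unfold pvSim
    rw [hlen]
  have hok : ((pvSortDesc edges).foldl (pvSimStep ((fragments.length : Nat) : Int))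
      { comp := PySem.List.pyRange 0 ((fragments.length : Nat) : Int) 1,
        indeg := List.replicate fragments.length 0,
        outdeg := List.replicate fragments.length 0,
        k := 0, ok := true, done := false }).ok = true := by
    rw [← hsim_eq]
    exact hPre.1
  have hFold := pvFold2_rel (N := fragments.length) (pvSortDesc edges) _ _ _
    (pvInit2_rel fragments.length)
  obtain ⟨_, _, _, _, _, hIn, _, hSel, _, _⟩ := hFold hok
  simp only [greedy_hamiltonian_path, greedy_hamiltonian_path_alt, hlen]
  rw [hIn, hSel]
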